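-- pv_equiv track=rewrite | github.com/HAHAHAHA123456/MyUtils | LeTou_Blue_StaticFunc.py | staticLotteryNumberWithInfo
-- ===== SOURCE A (Python) =====
-- def staticCounts_Continous_leaveOutFindMax(dataList, continousInfo, leaveOutInfo, number):
--     idx = 0
--     countsNumber = 0
--     maxContinous = 0
--     maxLeaveNumber = 0
--     while idx < len(dataList):
--         if number in dataList[idx]:
--             countsNumber += 1
--         if idx != len(dataList) - 1:
--             if continousInfo[idx][number - 1] > maxContinous:
--                 maxContinous = continousInfo[idx][number - 1]
--             if leaveOutInfo[idx][number - 1] > maxLeaveNumber: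
--                 maxLeaveNumber = leaveOutInfo[idx][number - 1]
--         idx += 1
--     return countsNumber, maxContinous, maxLeaveNumber
--
-- def staticLotteryNumberWithInfo(dataList, continousInfo, leaveOutInfo):
--     staticInfo_dict = {}
--     for i in range(1, 13):
--         tempDict = {}
--         countsNumber, maxContinous, maxLeaveNumber = staticCounts_Continous_leaveOutFindMax(dataList=dataList,
--                                                                                             continousInfo=continousInfo,
--                                                                                             leaveOutInfo=leaveOutInfo,
--                                                                                             number=i)
--         tempDict['countsNumber'] = countsNumber
--         tempDict['maxContinous'] = maxContinous
--         tempDict['maxLeaveNumber'] = maxLeaveNumber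
--         staticInfo_dict[str(i)] = tempDict
--     return staticInfo_dict
-- ===== SOURCE B (Python) =====
-- def staticLotteryNumberWithInfo(dataList, continousInfo, leaveOutInfo):
--     # single pass over the draws, maintaining parallel arrays for all 12 numbers
--     counts = [0] * 12
--     maxC = [0] * 12
--     maxL = [0] * 12
--     n = len(dataList)
--     for idx, row in enumerate(dataList):
--         counts = [counts[j] + 1 if j + 1 in row else counts[j] for j in range(12)]
--         if idx != n - 1:
--             crow = continousInfo[idx]
--             lrow = leaveOutInfo[idx]
--             maxC = [max(maxC[j], crow[j]) for j in range(12)]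
--             maxL = [max(maxL[j], lrow[j]) for j in range(12)]
--     return {str(j + 1): {'countsNumber': counts[j],
--                          'maxContinous': maxC[j],
--                          'maxLeaveNumber': maxL[j]}
--             for j in range(12)}
-- ===== Notes on version B (the rewrite author's own statement) =====
-- stated objective: alternative
-- what changed: B replaces A's twelve full rescans of the draw list (one per number, via the helper) with a single pass over the draws that maintains parallel count/maxContinous/maxLeaveNumber arrays for all 12 numbers at once, assembling the result dict from the arrays afterwards.
import Mathlib
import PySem

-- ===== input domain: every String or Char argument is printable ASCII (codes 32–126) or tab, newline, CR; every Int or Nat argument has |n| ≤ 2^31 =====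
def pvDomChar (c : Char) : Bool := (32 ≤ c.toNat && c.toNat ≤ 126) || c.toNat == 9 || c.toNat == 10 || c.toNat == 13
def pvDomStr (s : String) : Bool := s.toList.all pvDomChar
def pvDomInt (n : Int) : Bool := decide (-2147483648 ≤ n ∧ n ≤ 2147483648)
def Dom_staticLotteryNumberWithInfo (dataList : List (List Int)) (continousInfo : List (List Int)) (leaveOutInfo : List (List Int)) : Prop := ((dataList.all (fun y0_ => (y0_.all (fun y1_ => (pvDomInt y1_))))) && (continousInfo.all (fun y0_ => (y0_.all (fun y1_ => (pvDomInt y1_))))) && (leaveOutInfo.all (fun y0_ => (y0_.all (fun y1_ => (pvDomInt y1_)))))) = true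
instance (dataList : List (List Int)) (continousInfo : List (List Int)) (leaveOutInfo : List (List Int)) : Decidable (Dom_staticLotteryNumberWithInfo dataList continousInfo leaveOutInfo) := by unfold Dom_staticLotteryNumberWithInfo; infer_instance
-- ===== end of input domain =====

-- B makes one pass over the draws maintaining parallel per-number arrays instead of A's
-- twelve full rescans (one per number); objective: alternative decomposition, same results.

-- ===== PORT A =====
-- A's while loop over idx = 0 .. len(dataList)-1; list indexing is exact here because the
-- claim's Pre_ guarantees every accessed row exists and has ≥ 12 entries, and number ∈ 1..12
-- so (number-1).toNat is exact.
def staticCounts_Continous_leaveOutFindMax (dataList : List (List Int)) (continousInfo : List (List Int)) (leaveOutInfo : List (List Int)) (number : Int) : Int × Int × Int :=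
  (List.range dataList.length).foldl
    (fun s idx =>
      let countsNumber := if (dataList.getD idx []).contains number then s.1 + 1 else s.1
      if idx ≠ dataList.length - 1 then
        let c := (continousInfo.getD idx []).getD (number - 1).toNat 0
        let l := (leaveOutInfo.getD idx []).getD (number - 1).toNat 0
        (countsNumber, (if c > s.2.1 then c else s.2.1), (if l > s.2.2 then l else s.2.2))
      else
        (countsNumber, s.2.1, s.2.2))
    (0, 0, 0)

def staticLotteryNumberWithInfo (dataList : List (List Int)) (continousInfo : List (List Int)) (leaveOutInfo : List (List Int)) : List (String × List (String × Int)) :=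
  ((PySem.List.pyRange 1 13 1).foldl
    (fun (d : PySem.Dict String (List (String × Int))) i =>
      let r := staticCounts_Continous_leaveOutFindMax dataList continousInfo leaveOutInfo i
      let tempDict : PySem.Dict String Int :=
        ((PySem.Dict.empty.insert "countsNumber" r.1).insert "maxContinous" r.2.1).insert "maxLeaveNumber" r.2.2
      d.insert (PySem.Int.toStr i) tempDict.items)
    PySem.Dict.empty).items

-- ===== PORT B =====
def staticLotteryNumberWithInfo_alt (dataList : List (List Int)) (continousInfo : List (List Int)) (leaveOutInfo : List (List Int)) : List (String × List (String × Int)) :=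
  let n : Int := dataList.length
  let st :=
    (PySem.List.enumerate dataList 0).foldl
      (fun (st : List Int × List Int × List Int) p =>
        let counts := (List.range 12).map (fun (j : Nat) => if p.2.contains ((j : Int) + 1) then st.1.getD j 0 + 1 else st.1.getD j 0)
        if p.1 ≠ n - 1 then
          let crow := PySem.List.pyGetD continousInfo p.1 []
          let lrow := PySem.List.pyGetD leaveOutInfo p.1 []
          (counts,
           (List.range 12).map (fun j => max (st.2.1.getD j 0) (crow.getD j 0)),
           (List.range 12).map (fun j => max (st.2.2.getD j 0) (lrow.getD j 0)))
        else (counts, st.2.1, st.2.2))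
      (List.replicate 12 0, List.replicate 12 0, List.replicate 12 0)
  (List.range 12).map (fun (j : Nat) =>
    (PySem.Int.toStr ((j : Int) + 1),
     [("countsNumber", st.1.getD j 0), ("maxContinous", st.2.1.getD j 0), ("maxLeaveNumber", st.2.2.getD j 0)]))

-- ===== PRECONDITION & SPEC =====
-- Pre_ excludes exactly the inputs where Python A raises IndexError: whenever some index
-- idx < len(dataList)-1 is visited, continousInfo[idx] and leaveOutInfo[idx] must exist and
-- have at least 12 entries.
def Pre_staticLotteryNumberWithInfo (dataList : List (List Int)) (continousInfo : List (List Int)) (leaveOutInfo : List (List Int)) : Prop :=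
  ∀ i : Nat, i < dataList.length - 1 →
    i < continousInfo.length ∧ 12 ≤ (continousInfo.getD i []).length ∧
    i < leaveOutInfo.length ∧ 12 ≤ (leaveOutInfo.getD i []).length
instance (dataList : List (List Int)) (continousInfo : List (List Int)) (leaveOutInfo : List (List Int)) : Decidable (Pre_staticLotteryNumberWithInfo dataList continousInfo leaveOutInfo) := by unfold Pre_staticLotteryNumberWithInfo; infer_instance

def pvWitness_staticLotteryNumberWithInfo : List (List Int) × List (List Int) × List (List Int) :=
  ([[1], [2, 12]], [[3, 0, 0, 0, 0, 0, 0, 0, 0, 0, 0, 0]], [[5, 0, 0, 0, 0, 0, 0, 0, 0, 0, 0, 0]])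

def Spec_staticLotteryNumberWithInfo (dataList : List (List Int)) (continousInfo : List (List Int)) (leaveOutInfo : List (List Int)) (out : List (String × List (String × Int))) : Prop := out = staticLotteryNumberWithInfo_alt dataList continousInfo leaveOutInfo
instance (dataList : List (List Int)) (continousInfo : List (List Int)) (leaveOutInfo : List (List Int)) (out : List (String × List (String × Int))) : Decidable (Spec_staticLotteryNumberWithInfo dataList continousInfo leaveOutInfo out) := by unfold Spec_staticLotteryNumberWithInfo; infer_instance

-- ===== CLAIM (what is proved, stated in full; the proofs are below) =====
def Claim_equal_staticLotteryNumberWithInfo : Prop := ∀ (dataList : List (List Int)) (continousInfo : List (List Int)) (leaveOutInfo : List (List Int)), Dom_staticLotteryNumberWithInfo dataList continousInfo leaveOutInfo → Pre_staticLotteryNumberWithInfo dataList continousInfo leaveOutInfo → Spec_staticLotteryNumberWithInfo dataList continousInfo leaveOutInfo (staticLotteryNumberWithInfo dataList continousInfo leaveOutInfo)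

-- ===== LEMMAS AND PROOFS =====

-- A's loop body, with the loop index as a Nat
def pvAstep (dataList continousInfo leaveOutInfo : List (List Int)) (number : Int) (s : Int × Int × Int) (idx : Nat) : Int × Int × Int :=
  let countsNumber := if (dataList.getD idx []).contains number then s.1 + 1 else s.1
  if idx ≠ dataList.length - 1 then
    let c := (continousInfo.getD idx []).getD (number - 1).toNat 0
    let l := (leaveOutInfo.getD idx []).getD (number - 1).toNat 0
    (countsNumber, (if c > s.2.1 then c else s.2.1), (if l > s.2.2 then l else s.2.2))
  else
    (countsNumber, s.2.1, s.2.2)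

-- B's loop body, with the loop index as a Nat
def pvBstep (dataList continousInfo leaveOutInfo : List (List Int)) (st : List Int × List Int × List Int) (k : Nat) : List Int × List Int × List Int :=
  let counts := (List.range 12).map (fun (j : Nat) => if (dataList.getD k []).contains ((j : Int) + 1) then st.1.getD j 0 + 1 else st.1.getD j 0)
  if k ≠ dataList.length - 1 then
    (counts,
     (List.range 12).map (fun j => max (st.2.1.getD j 0) ((continousInfo.getD k []).getD j 0)),
     (List.range 12).map (fun j => max (st.2.2.getD j 0) ((leaveOutInfo.getD k []).getD j 0)))
  else (counts, st.2.1, st.2.2)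

def pvSt (dataList continousInfo leaveOutInfo : List (List Int)) : List Int × List Int × List Int :=
  (List.range dataList.length).foldl (pvBstep dataList continousInfo leaveOutInfo)
    (List.replicate 12 0, List.replicate 12 0, List.replicate 12 0)

theorem pvHelper_eq (dataList continousInfo leaveOutInfo : List (List Int)) (number : Int) :
    staticCounts_Continous_leaveOutFindMax dataList continousInfo leaveOutInfo number =
      (List.range dataList.length).foldl (pvAstep dataList continousInfo leaveOutInfo number) (0, 0, 0) := rfl

theorem pvGetD_map_range12 (f : Nat → Int) (j : Nat) (hj : j < 12) :
    ((List.range 12).map f).getD j 0 = f j := by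
  simp [List.getD, hj]

theorem pvStep_commute (dataList continousInfo leaveOutInfo : List (List Int)) (j k : Nat)
    (hj : j < 12) (st : List Int × List Int × List Int) :
    ((pvBstep dataList continousInfo leaveOutInfo st k).1.getD j 0,
     (pvBstep dataList continousInfo leaveOutInfo st k).2.1.getD j 0,
     (pvBstep dataList continousInfo leaveOutInfo st k).2.2.getD j 0) =
    pvAstep dataList continousInfo leaveOutInfo ((j : Int) + 1)
      (st.1.getD j 0, st.2.1.getD j 0, st.2.2.getD j 0) k := by
  unfold pvBstep pvAstep
  have hn : (((j : Int) + 1) - 1).toNat = j := by omega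
  by_cases hk : k = dataList.length - 1
  · rw [if_neg (fun h => h hk), if_neg (fun h => h hk)]
    dsimp only
    rw [pvGetD_map_range12 _ j hj]
  · rw [if_pos hk, if_pos hk]
    dsimp only
    simp only [Prod.mk.injEq, hn]
    refine ⟨?_, ?_, ?_⟩
    · rw [pvGetD_map_range12 _ j hj]
    · rw [pvGetD_map_range12 _ j hj]; omega
    · rw [pvGetD_map_range12 _ j hj]; omega

theorem pvFold_commute (dataList continousInfo leaveOutInfo : List (List Int)) (j : Nat) (hj : j < 12)
    (m : Nat) (st : List Int × List Int × List Int) :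
    (((List.range m).foldl (pvBstep dataList continousInfo leaveOutInfo) st).1.getD j 0,
     ((List.range m).foldl (pvBstep dataList continousInfo leaveOutInfo) st).2.1.getD j 0,
     ((List.range m).foldl (pvBstep dataList continousInfo leaveOutInfo) st).2.2.getD j 0) =
    (List.range m).foldl (pvAstep dataList continousInfo leaveOutInfo ((j : Int) + 1))
      (st.1.getD j 0, st.2.1.getD j 0, st.2.2.getD j 0) := by
  induction m with
  | zero => simp
  | succ m ih =>
    rw [List.range_succ, List.foldl_append, List.foldl_append]
    simp only [List.foldl_cons, List.foldl_nil]
    rw [pvStep_commute _ _ _ j m hj, ih]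

theorem pvPer_number (dataList continousInfo leaveOutInfo : List (List Int)) (number : Int)
    (j : Nat) (hj : j < 12) (hn : number = (j : Int) + 1) :
    staticCounts_Continous_leaveOutFindMax dataList continousInfo leaveOutInfo number =
      ((pvSt dataList continousInfo leaveOutInfo).1.getD j 0,
       (pvSt dataList continousInfo leaveOutInfo).2.1.getD j 0,
       (pvSt dataList continousInfo leaveOutInfo).2.2.getD j 0) := by
  subst hn
  rw [pvHelper_eq, pvSt, pvFold_commute dataList continousInfo leaveOutInfo j hj]
  have h0 : ((List.replicate 12 (0:Int)).getD j 0) = 0 := by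
    interval_cases j <;> rfl
  rw [h0]

-- B's enumerate fold is the Nat-indexed fold pvSt
theorem pvAlt_fold_eq (dataList continousInfo leaveOutInfo : List (List Int)) :
    ((PySem.List.enumerate dataList 0).foldl
      (fun (st : List Int × List Int × List Int) p =>
        let counts := (List.range 12).map (fun (j : Nat) => if p.2.contains ((j : Int) + 1) then st.1.getD j 0 + 1 else st.1.getD j 0)
        if p.1 ≠ (dataList.length : Int) - 1 then
          let crow := PySem.List.pyGetD continousInfo p.1 []
          let lrow := PySem.List.pyGetD leaveOutInfo p.1 []
          (counts,
           (List.range 12).map (fun j => max (st.2.1.getD j 0) (crow.getD j 0)),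
           (List.range 12).map (fun j => max (st.2.2.getD j 0) (lrow.getD j 0)))
        else (counts, st.2.1, st.2.2))
      (List.replicate 12 0, List.replicate 12 0, List.replicate 12 0)) =
    pvSt dataList continousInfo leaveOutInfo := by
  rw [PySem.List.enumerate_eq_map_pyRange (xs := dataList) (d := ([] : List Int)), List.foldl_map]
  simp only [PySem.List.len_eq]
  rw [PySem.List.pyRange_zero_nat, List.foldl_map]
  unfold pvSt
  apply PySem.List.foldl_congr_mem
  intro acc k hk
  have hklt : k < dataList.length := List.mem_range.mp hk
  have hcond : ((k : Int) ≠ (dataList.length : Int) - 1) = (k ≠ dataList.length - 1) := by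
    apply propext; omega
  simp only [PySem.List.pyGetD_natCast, hcond]
  rfl

-- ===== VERDICT (by name: the statement is the Claim_ definition above) =====
theorem staticLotteryNumberWithInfo_spec : Claim_equal_staticLotteryNumberWithInfo := by
  intro dataList continousInfo leaveOutInfo _ _
  unfold Spec_staticLotteryNumberWithInfo staticLotteryNumberWithInfo staticLotteryNumberWithInfo_alt
  dsimp only
  rw [pvAlt_fold_eq]
  rw [show PySem.List.pyRange 1 13 1 = List.map (fun k => (Int.ofNat k) + 1) (List.range 12) from by decide]
  rw [PySem.Dict.items_foldl_insert_fresh _ _ _ _ (by intro a _; rfl) (by decide)]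
  rw [List.map_map, show (PySem.Dict.empty : PySem.Dict String (List (String × Int))).items = [] from rfl, List.nil_append]
  apply List.map_congr_left
  intro k hk
  have hk12 : k < 12 := List.mem_range.mp hk
  rw [Function.comp_def]
  dsimp only
  rw [pvPer_number dataList continousInfo leaveOutInfo (Int.ofNat k + 1) k hk12 (by norm_cast)]
  rfl
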